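-- pv_equiv track=rewrite | github.com/chainik1125/temp_xc | src/v2_temporal_schemeC/plot_exp1_exp2.py | pareto_min
-- ===== SOURCE A (Python) =====
-- def pareto_min(xs, ys):
--     """Lower-envelope Pareto frontier (minimize y)."""
--     pts = sorted(zip(xs, ys))
--     fx, fy = [], []
--     best = float("inf")
--     for x, y in pts:
--         if y < best:
--             fx.append(x); fy.append(y); best = y
--     return fx, fy
-- ===== SOURCE B (Python) =====
-- def pareto_min(xs, ys):
--     """Lower-envelope Pareto frontier (minimize y): prefix-min table, then select."""
--     pts = sorted(zip(xs, ys))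
--     prefmin = []
--     for _, y in pts:
--         prefmin.append(y if not prefmin or y < prefmin[-1] else prefmin[-1])
--     prev = [None] + prefmin[:-1]
--     fx = [x for (x, y), m in zip(pts, prev) if m is None or y < m]
--     fy = [y for (x, y), m in zip(pts, prev) if m is None or y < m]
--     return fx, fy
-- ===== Notes on version B (the rewrite author's own statement) =====
-- stated objective: alternative
-- what changed: A's single fused loop tracking a running best is replaced by a two-pass decomposition: first materialize a prefix-minimum table over the sorted y-values, then a separate selection pass keeps the points whose y strictly beats the previous prefix-minimum.
import Mathlib
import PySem

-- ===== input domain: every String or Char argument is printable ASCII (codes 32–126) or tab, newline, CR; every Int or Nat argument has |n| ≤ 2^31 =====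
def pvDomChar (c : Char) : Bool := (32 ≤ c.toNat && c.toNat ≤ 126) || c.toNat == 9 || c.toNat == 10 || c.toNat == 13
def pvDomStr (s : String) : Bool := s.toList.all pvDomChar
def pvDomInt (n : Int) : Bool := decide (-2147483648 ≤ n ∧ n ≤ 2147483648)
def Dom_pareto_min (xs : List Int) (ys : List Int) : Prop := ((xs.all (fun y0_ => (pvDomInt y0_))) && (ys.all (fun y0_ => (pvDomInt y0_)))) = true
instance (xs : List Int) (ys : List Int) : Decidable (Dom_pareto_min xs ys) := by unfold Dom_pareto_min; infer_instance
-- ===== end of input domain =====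

-- B replaces A's fused best-tracking loop by a materialized prefix-minimum table plus a
-- separate selection pass (objective: alternative decomposition, same cost).

-- ===== PORT A =====
-- float("inf") ported as Option Int (none = inf): 'y < best' is true when best = none.
def pareto_min (xs : List Int) (ys : List Int) : List Int × List Int :=
  let pts := PySem.List.sorted2 (xs.zip ys) Prod.fst Prod.snd
  let r := pts.foldl (fun (s : List Int × List Int × Option Int) p =>
    match s.2.2 with
    | none => (s.1 ++ [p.1], s.2.1 ++ [p.2], some p.2)
    | some b => if p.2 < b then (s.1 ++ [p.1], s.2.1 ++ [p.2], some p.2) else s)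
    (([] : List Int), ([] : List Int), (none : Option Int))
  (r.1, r.2.1)

-- ===== PORT B =====
def pareto_min_alt (xs : List Int) (ys : List Int) : List Int × List Int :=
  let pts := PySem.List.sorted2 (xs.zip ys) Prod.fst Prod.snd
  let prefmin := pts.foldl (fun (acc : List Int) p =>
    acc ++ [match acc.getLast? with
            | none => p.2
            | some m => if p.2 < m then p.2 else m]) []
  let prev : List (Option Int) := [none] ++ (PySem.List.slice prefmin none (some (-1))).map some
  let keep := fun (pm : (Int × Int) × Option Int) =>
    match pm.2 with | none => true | some m => decide (pm.1.2 < m)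
  let fx := ((pts.zip prev).filter keep).map (fun pm => pm.1.1)
  let fy := ((pts.zip prev).filter keep).map (fun pm => pm.1.2)
  (fx, fy)

-- ===== PRECONDITION & SPEC =====
def Spec_pareto_min (xs : List Int) (ys : List Int) (out : List Int × List Int) : Prop := out = pareto_min_alt xs ys
instance (xs : List Int) (ys : List Int) (out : List Int × List Int) : Decidable (Spec_pareto_min xs ys out) := by unfold Spec_pareto_min; infer_instance

-- ===== CLAIM (what is proved, stated in full; the proofs are below) =====
def Claim_equal_pareto_min : Prop := ∀ (xs : List Int) (ys : List Int), Dom_pareto_min xs ys → Spec_pareto_min xs ys (pareto_min xs ys)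

-- ===== LEMMAS AND PROOFS =====

-- canonical frontier of a point list starting from best = b (none = +inf)
def pmE : Option Int → List (Int × Int) → List Int × List Int
  | _, [] => ([], [])
  | none, p :: ps => (p.1 :: (pmE (some p.2) ps).1, p.2 :: (pmE (some p.2) ps).2)
  | some m, p :: ps =>
      if p.2 < m then (p.1 :: (pmE (some p.2) ps).1, p.2 :: (pmE (some p.2) ps).2)
      else pmE (some m) ps

-- final best of A's loop
def pmBest : Option Int → List (Int × Int) → Option Int
  | b, [] => b
  | none, p :: ps => pmBest (some p.2) ps
  | some m, p :: ps => if p.2 < m then pmBest (some p.2) ps else pmBest (some m) ps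

-- running-minimum list starting from state b
def pmRM : Option Int → List (Int × Int) → List Int
  | _, [] => []
  | b, p :: ps =>
      let m' := match b with | none => p.2 | some m => if p.2 < m then p.2 else m
      m' :: pmRM (some m') ps

lemma pmRM_length (ps : List (Int × Int)) : ∀ b, (pmRM b ps).length = ps.length := by
  induction ps with
  | nil => intro b; rfl
  | cons p t ih => intro b; simp [pmRM, ih]

lemma foldA_eq (ps : List (Int × Int)) : ∀ (fx fy : List Int) (b : Option Int),
    ps.foldl (fun (s : List Int × List Int × Option Int) p =>
      match s.2.2 with
      | none => (s.1 ++ [p.1], s.2.1 ++ [p.2], some p.2)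
      | some m => if p.2 < m then (s.1 ++ [p.1], s.2.1 ++ [p.2], some p.2) else s)
      (fx, fy, b)
    = (fx ++ (pmE b ps).1, fy ++ (pmE b ps).2, pmBest b ps) := by
  induction ps with
  | nil => intro fx fy b; simp [pmE, pmBest]
  | cons p t ih =>
      intro fx fy b
      cases b with
      | none => simp [List.foldl_cons, ih, pmE, pmBest]
      | some m =>
          by_cases h : p.2 < m
          · simp [List.foldl_cons, h, ih, pmE, pmBest]
          · simp [List.foldl_cons, h, ih, pmE, pmBest]

lemma foldPref_eq (ps : List (Int × Int)) : ∀ (acc : List Int),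
    ps.foldl (fun (acc : List Int) p =>
      acc ++ [match acc.getLast? with
              | none => p.2
              | some m => if p.2 < m then p.2 else m]) acc
    = acc ++ pmRM acc.getLast? ps := by
  induction ps with
  | nil => intro acc; simp [pmRM]
  | cons p t ih =>
      intro acc
      rw [List.foldl_cons, ih]
      simp [pmRM]

lemma zip_dropLast_eq {α β : Type} (ps : List α) : ∀ (l : List β), ps.length < l.length →
    ps.zip l.dropLast = ps.zip l := by
  induction ps with
  | nil => intro l _; simp
  | cons p t ih =>
      intro l h
      match l with
      | [] => simp at h
      | [c] => simp at h
      | c :: d :: l'' =>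
          simp only [List.dropLast_cons₂, List.zip_cons_cons]
          rw [ih (d :: l'') (by simpa using Nat.lt_of_succ_lt_succ h)]

lemma sel_eq (ps : List (Int × Int)) : ∀ (b : Option Int),
    (((ps.zip (b :: (pmRM b ps).map some)).filter
        (fun (pm : (Int × Int) × Option Int) =>
          match pm.2 with | none => true | some m => decide (pm.1.2 < m))).map (fun pm => pm.1.1),
     ((ps.zip (b :: (pmRM b ps).map some)).filter
        (fun (pm : (Int × Int) × Option Int) =>
          match pm.2 with | none => true | some m => decide (pm.1.2 < m))).map (fun pm => pm.1.2))
    = pmE b ps := by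
  induction ps with
  | nil => intro b; simp [pmE]
  | cons p t ih =>
      intro b
      cases b with
      | none => simpa [pmRM, pmE, List.filter, Prod.ext_iff] using Prod.ext_iff.mp (ih (some p.2))
      | some m =>
          by_cases h : p.2 < m
          · simpa [pmRM, pmE, h, List.filter, Prod.ext_iff] using Prod.ext_iff.mp (ih (some p.2))
          · simpa [pmRM, pmE, h, List.filter, Prod.ext_iff] using Prod.ext_iff.mp (ih (some m))

-- ===== VERDICT (by name: the statement is the Claim_ definition above) =====
theorem pareto_min_spec : Claim_equal_pareto_min := by
  intro xs ys _
  unfold Spec_pareto_min pareto_min pareto_min_alt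
  set pts := PySem.List.sorted2 (xs.zip ys) Prod.fst Prod.snd
  dsimp only
  rw [foldA_eq, foldPref_eq]
  simp only [List.nil_append, List.getLast?_nil]
  rw [PySem.List.slice_to_neg_one, List.map_dropLast]
  rcases pts with _ | ⟨p, t⟩
  · simp [pmE]
  · rw [show ([none] ++ ((pmRM none (p :: t)).map some).dropLast : List (Option Int))
           = (none :: (pmRM none (p :: t)).map some).dropLast from by simp [pmRM],
        zip_dropLast_eq (p :: t) (none :: (pmRM none (p :: t)).map some)
          (by simp [pmRM_length])]
    have := sel_eq (p :: t) none
    rw [Prod.ext_iff] at this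
    exact Prod.ext_iff.mpr ⟨this.1.symm, this.2.symm⟩
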